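-- pv_equiv track=rewrite | github.com/jonasac/DasBot | src/plugins/TruthTable/tt.py | bracketSymmetry
-- ===== SOURCE A (Python) =====
-- def bracketSymmetry(statement):
--     sym = 0
--     for symbol in statement:
--         if symbol == '(':
--             sym += 1
--         elif symbol == ')':
--             sym -= 1
--
--     return sym
-- ===== SOURCE B (Python) =====
-- def bracketSymmetry(statement):
--     # Stack-based bracket matcher: matched pairs cancel on the stack;
--     # the balance is (unmatched opens left on the stack) - (unmatched closes).
--     stack = []
--     unmatched_close = 0
--     for symbol in statement:
--         if symbol == '(':
--             stack.append(symbol)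
--         elif symbol == ')':
--             if stack:
--                 stack.pop()
--             else:
--                 unmatched_close += 1
--     return len(stack) - unmatched_close
-- ===== Notes on version B (the rewrite author's own statement) =====
-- stated objective: alternative
-- what changed: Replaces the single running-balance accumulator with a stack-based bracket matcher: each open parenthesis is pushed, each close parenthesis pops a matching open when one exists and otherwise increments an unmatched-close counter; the result is the final stack depth minus the unmatched-close count, equal to A's balance because matched pairs cancel.
import Mathlib
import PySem

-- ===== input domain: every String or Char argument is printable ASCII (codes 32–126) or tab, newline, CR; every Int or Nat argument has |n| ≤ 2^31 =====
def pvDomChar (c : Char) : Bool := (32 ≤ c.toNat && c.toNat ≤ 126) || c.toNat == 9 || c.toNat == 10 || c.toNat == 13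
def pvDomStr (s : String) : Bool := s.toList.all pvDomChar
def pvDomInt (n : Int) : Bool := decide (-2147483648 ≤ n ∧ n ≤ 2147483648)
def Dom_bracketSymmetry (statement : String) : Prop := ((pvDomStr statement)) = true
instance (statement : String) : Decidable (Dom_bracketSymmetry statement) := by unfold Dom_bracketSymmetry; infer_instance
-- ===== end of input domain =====

-- B replaces the running-balance accumulator with a stack-based bracket matcher
-- (push '(', pop on ')', count unmatched closes); objective: alternative.


-- ===== PORT A =====
-- A's loop body: running balance
def pvStepA (sym : Int) (symbol : Char) : Int :=
  if symbol == '(' then sym + 1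
  else if symbol == ')' then sym - 1
  else sym

def bracketSymmetry (statement : String) : Int :=
  statement.toList.foldl pvStepA 0

-- ===== PORT B =====
-- Source B's loop body: state = (stack, unmatched_close)
def pvStepB (s : List Char × Nat) (symbol : Char) : List Char × Nat :=
  if symbol == '(' then (symbol :: s.1, s.2)
  else if symbol == ')' then
    match s.1 with
    | _ :: t => (t, s.2)
    | [] => (s.1, s.2 + 1)
  else s

def bracketSymmetry_alt (statement : String) : Int :=
  let st := statement.toList.foldl pvStepB ([], 0)
  (st.1.length : Int) - (st.2 : Int)

-- ===== PRECONDITION & SPEC =====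
def Spec_bracketSymmetry (statement : String) (out : Int) : Prop := out = bracketSymmetry_alt statement
instance (statement : String) (out : Int) : Decidable (Spec_bracketSymmetry statement out) := by unfold Spec_bracketSymmetry; infer_instance

-- ===== CLAIM (what is proved, stated in full; the proofs are below) =====
def Claim_equal_bracketSymmetry : Prop := ∀ (statement : String), Dom_bracketSymmetry statement → Spec_bracketSymmetry statement (bracketSymmetry statement)

-- ===== LEMMAS AND PROOFS =====
lemma stepA_open (a : Int) : pvStepA a '(' = a + 1 := rfl
lemma stepA_close (a : Int) : pvStepA a ')' = a - 1 := rfl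
lemma stepA_other (a : Int) (c : Char) (h1 : c ≠ '(') (h2 : c ≠ ')') : pvStepA a c = a := by
  simp [pvStepA, h1, h2]
lemma stepB_open (st : List Char) (d : Nat) : pvStepB (st, d) '(' = ('(' :: st, d) := rfl
lemma stepB_close_nil (d : Nat) : pvStepB ([], d) ')' = ([], d + 1) := rfl
lemma stepB_close_cons (x : Char) (xs : List Char) (d : Nat) : pvStepB (x :: xs, d) ')' = (xs, d) := rfl
lemma stepB_other (s : List Char × Nat) (c : Char) (h1 : c ≠ '(') (h2 : c ≠ ')') : pvStepB s c = s := by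
  simp [pvStepB, h1, h2]

-- Invariant: stack-length minus unmatched-close deficit advances exactly like A's balance.
lemma stack_invariant (l : List Char) (st : List Char) (d : Nat) (a : Int) :
    ((l.foldl pvStepB (st, d)).1.length : Int) - ((l.foldl pvStepB (st, d)).2 : Int) =
      (st.length : Int) - (d : Int) + (l.foldl pvStepA a - a) := by
  induction l generalizing st d a with
  | nil => simp
  | cons c t ih =>
    rw [List.foldl_cons, List.foldl_cons]
    by_cases h1 : c = '('
    · subst h1
      rw [stepB_open, stepA_open, ih ('(' :: st) d (a + 1)]
      push_cast [List.length_cons]; ring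
    · by_cases h2 : c = ')'
      · subst h2
        cases st with
        | nil =>
          rw [stepB_close_nil, stepA_close, ih [] (d + 1) (a - 1)]
          push_cast; ring
        | cons x xs =>
          rw [stepB_close_cons, stepA_close, ih xs d (a - 1)]
          push_cast [List.length_cons]; ring
      · rw [stepB_other _ _ h1 h2, stepA_other _ _ h1 h2, ih st d a]

-- ===== VERDICT (by name: the statement is the Claim_ definition above) =====
theorem bracketSymmetry_spec : Claim_equal_bracketSymmetry := by
  intro s _
  unfold Spec_bracketSymmetry bracketSymmetry bracketSymmetry_alt
  have h := stack_invariant s.toList [] 0 0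
  simp only [List.length_nil, Int.natCast_zero, sub_zero, zero_add] at h
  simpa using h.symm
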